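-- pv_equiv track=rewrite | github.com/XiaohanAmberLiu/tools-group-project | Main_Combination_And_Filter.py | get_all_hotels
-- ===== SOURCE A (Python) =====
-- def get_all_hotels(hotel_airbnb,hotel_booking):
--     hotel_list = []
--     all_hotel = []
--     all_hotel.extend(hotel_airbnb)
--     all_hotel.extend(hotel_booking)
--
--     for i in all_hotel:
--         same = False
--         for j in hotel_list:
--             if j[0]==i[0]:
--                 same = True
--                 if i[1]<j[1]:
--                     hotel_list.remove(j)
--                     hotel_list.append(i)
--                     break
--                 else:
--                     break
--         if same == False:
--             hotel_list.append(i)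
--     return hotel_list
-- ===== SOURCE B (Python) =====
-- def get_all_hotels(hotel_airbnb, hotel_booking):
--     # Two staged passes instead of A's online list maintenance with remove/append:
--     # pass 1 computes the minimum price per hotel name; pass 2 keeps, in input
--     # order, the first occurrence that attains its name's minimum.  That element
--     # is exactly the one A's move-to-end process leaves in place, and filtering
--     # the concatenation in index order yields A's final order, since each kept
--     # entry was last appended by A at the index of that winning occurrence.
--     items = hotel_airbnb + hotel_booking
--     best = {}
--     for name, price in items:
--         if name not in best or price < best[name]:
--             best[name] = price
--     seen = set()
--     out = []
--     for name, price in items: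
--         if price == best[name] and name not in seen:
--             seen.add(name)
--             out.append((name, price))
--     return out
-- ===== Notes on version B (the rewrite author's own statement) =====
-- stated objective: faster
-- what changed: Replaces A's online list maintenance (scan accumulated list, remove matched entry, append to end) by two offline passes: compute the minimum price per name, then stably filter the concatenation keeping the first occurrence attaining its name's minimum; no element is ever moved or removed.
import Mathlib
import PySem

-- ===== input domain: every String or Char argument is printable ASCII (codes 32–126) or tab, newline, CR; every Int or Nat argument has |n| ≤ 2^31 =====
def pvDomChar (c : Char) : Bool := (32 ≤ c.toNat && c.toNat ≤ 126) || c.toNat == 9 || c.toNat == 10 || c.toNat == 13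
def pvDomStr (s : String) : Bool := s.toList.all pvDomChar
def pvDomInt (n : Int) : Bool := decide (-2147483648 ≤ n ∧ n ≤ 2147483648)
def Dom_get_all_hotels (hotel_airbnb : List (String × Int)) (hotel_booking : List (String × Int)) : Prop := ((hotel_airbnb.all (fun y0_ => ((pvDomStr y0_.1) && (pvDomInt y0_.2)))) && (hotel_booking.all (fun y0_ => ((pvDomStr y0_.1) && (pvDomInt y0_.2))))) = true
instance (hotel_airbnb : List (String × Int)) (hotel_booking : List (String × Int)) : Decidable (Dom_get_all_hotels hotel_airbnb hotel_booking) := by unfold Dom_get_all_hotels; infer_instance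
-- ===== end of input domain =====

-- B replaces A's quadratic online list maintenance (scan, remove, append-to-end) by two
-- offline linear passes: minimum price per name, then a stable filter keeping the first
-- occurrence that attains its name's minimum.

-- ===== PORT A =====
-- inner 'for j in hotel_list' loop of A: scans the suffix, on the first key match either
-- removes j and appends i (strictly cheaper) or stops; if no match, appends i.
def pvAInner (hotel_list : List (String × Int)) (i : String × Int) : List (String × Int) → List (String × Int)
  | [] => hotel_list ++ [i]                    -- same == False: hotel_list.append(i)
  | j :: rest =>
      if j.1 = i.1 then
        if i.2 < j.2 then
          ((PySem.List.remove? hotel_list j).getD hotel_list) ++ [i]  -- remove never fails: j ∈ hotel_list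
        else hotel_list
      else pvAInner hotel_list i rest

def pvAStep (hotel_list : List (String × Int)) (i : String × Int) : List (String × Int) :=
  pvAInner hotel_list i hotel_list

def get_all_hotels (hotel_airbnb : List (String × Int)) (hotel_booking : List (String × Int)) : List (String × Int) :=
  (hotel_airbnb ++ hotel_booking).foldl pvAStep []

-- ===== PORT B =====
-- pass 1: 'if name not in best or price < best[name]: best[name] = price'
def pvBestStep (best : PySem.Dict String Int) (x : String × Int) : PySem.Dict String Int :=
  if !(best.contains x.1) || decide (x.2 < best.getD x.1 0) then best.insert x.1 x.2 else best

-- pass 2 body: 'if price == best[name] and name not in seen: seen.add(name); out.append(x)'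
-- (best[name]: the key is always present after pass 1, so getD's default is never read)
def pvPickStep (best : PySem.Dict String Int) (st : PySem.Set String × List (String × Int))
    (x : String × Int) : PySem.Set String × List (String × Int) :=
  if decide (x.2 = best.getD x.1 0) && !(PySem.Set.contains st.1 x.1)
  then (PySem.Set.add st.1 x.1, st.2 ++ [x]) else st

def get_all_hotels_alt (hotel_airbnb : List (String × Int)) (hotel_booking : List (String × Int)) : List (String × Int) :=
  let items := hotel_airbnb ++ hotel_booking
  let best := items.foldl pvBestStep PySem.Dict.empty
  (items.foldl (pvPickStep best) (PySem.Set.empty, [])).2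

-- ===== PRECONDITION & SPEC =====
def Spec_get_all_hotels (hotel_airbnb : List (String × Int)) (hotel_booking : List (String × Int)) (out : List (String × Int)) : Prop := out = get_all_hotels_alt hotel_airbnb hotel_booking
instance (hotel_airbnb : List (String × Int)) (hotel_booking : List (String × Int)) (out : List (String × Int)) : Decidable (Spec_get_all_hotels hotel_airbnb hotel_booking out) := by unfold Spec_get_all_hotels; infer_instance

-- ===== CLAIM (what is proved, stated in full; the proofs are below) =====
def Claim_equal_get_all_hotels : Prop := ∀ (hotel_airbnb : List (String × Int)) (hotel_booking : List (String × Int)), Dom_get_all_hotels hotel_airbnb hotel_booking → Spec_get_all_hotels hotel_airbnb hotel_booking (get_all_hotels hotel_airbnb hotel_booking)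

-- ===== LEMMAS AND PROOFS =====

-- A's inner loop equals a find?-then-act description.
lemma pvAInner_eq (L : List (String × Int)) (i : String × Int) (M : List (String × Int)) :
    pvAInner L i M =
      match M.find? (fun j => j.1 == i.1) with
      | some j => if i.2 < j.2 then ((PySem.List.remove? L j).getD L) ++ [i] else L
      | none => L ++ [i] := by
  induction M with
  | nil => rfl
  | cons j rest ih =>
      by_cases h : j.1 = i.1
      · simp [pvAInner, h, List.find?]
      · have hb : (j.1 == i.1) = false := by simp [h]
        simp [pvAInner, h, List.find?, hb, ih]

-- with unique keys, erasing the found element is filtering out its key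
lemma erase_eq_filter_of_nodup (k : String) (j : String × Int) :
    ∀ (L : List (String × Int)), (L.map Prod.fst).Nodup →
      L.find? (fun q => q.1 == k) = some j →
      L.erase j = L.filter (fun q => !(q.1 == k)) := by
  intro L
  induction L with
  | nil => intro _ h; simp at h
  | cons q rest ih =>
      intro hnd hf
      simp only [List.map_cons, List.nodup_cons] at hnd
      by_cases hq : q.1 = k
      · have hj : j = q := by
          simp [List.find?, hq] at hf; exact hf.symm
        subst hj
        have hall : rest.filter (fun q' => !(q'.1 == k)) = rest := by
          apply List.filter_eq_self.mpr
          intro a ha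
          simp only [Bool.not_eq_eq_eq_not, Bool.not_true, beq_eq_false_iff_ne, ne_eq]
          intro hak
          exact hnd.1 (by simpa [hak, hq] using List.mem_map_of_mem (f := Prod.fst) ha)
        simp [hq, hall]
      · have hb : (q.1 == k) = false := by simp [hq]
        have hf' : rest.find? (fun q' => q'.1 == k) = some j := by
          simpa [List.find?, hb] using hf
        have hjk : j.1 = k := by
          have := List.find?_some hf'; simpa using this
        have hqj : q ≠ j := fun h => hq (h ▸ hjk)
        have : (q == j) = false := by simp [hqj]
        simp [this, hq, ih hnd.2 hf']

-- recursive reference form of B's second pass (proof-only)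
def pvPickR (best : PySem.Dict String Int) (s : PySem.Set String) :
    List (String × Int) → PySem.Set String × List (String × Int)
  | [] => (s, [])
  | x :: t =>
      if decide (x.2 = best.getD x.1 0) && !(PySem.Set.contains s x.1)
      then ((pvPickR best (PySem.Set.add s x.1) t).1, x :: (pvPickR best (PySem.Set.add s x.1) t).2)
      else pvPickR best s t

lemma pick_foldl_eq_pickR (best : PySem.Dict String Int) :
    ∀ (l : List (String × Int)) (s : PySem.Set String) (o : List (String × Int)),
      l.foldl (pvPickStep best) (s, o) = ((pvPickR best s l).1, o ++ (pvPickR best s l).2) := by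
  intro l
  induction l with
  | nil => intro s o; simp [pvPickR]
  | cons x t ih =>
      intro s o
      simp only [List.foldl_cons, pvPickStep, pvPickR]
      by_cases h : (decide (x.2 = best.getD x.1 0) && !(PySem.Set.contains s x.1)) = true
      · rw [if_pos h, if_pos h]; simp [ih]
      · rw [if_neg h, if_neg h]; exact ih s o

lemma pickR_congr (best1 best2 : PySem.Dict String Int) :
    ∀ (l : List (String × Int)) (s1 s2 : PySem.Set String),
      (∀ e ∈ l, best1.getD e.1 0 = best2.getD e.1 0) →
      (∀ k, k ∈ s1 ↔ k ∈ s2) →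
      (pvPickR best1 s1 l).2 = (pvPickR best2 s2 l).2 ∧
      (∀ k, k ∈ (pvPickR best1 s1 l).1 ↔ k ∈ (pvPickR best2 s2 l).1) := by
  intro l
  induction l with
  | nil => intro s1 s2 _ hs; exact ⟨rfl, hs⟩
  | cons x t ih =>
      intro s1 s2 hb hs
      have hbx : best1.getD x.1 0 = best2.getD x.1 0 := hb x (by simp)
      have hcx : PySem.Set.contains s1 x.1 = PySem.Set.contains s2 x.1 := by
        by_cases hm : x.1 ∈ s1
        · have hm2 : x.1 ∈ s2 := (hs x.1).mp hm
          simp [pysem, hm, hm2]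
        · have hm2 : x.1 ∉ s2 := fun h => hm ((hs x.1).mpr h)
          simp [pysem, hm, hm2]
      have hb' : ∀ e ∈ t, best1.getD e.1 0 = best2.getD e.1 0 := fun e he => hb e (by simp [he])
      simp only [pvPickR, hbx, hcx]
      by_cases h : (decide (x.2 = best2.getD x.1 0) && !(PySem.Set.contains s2 x.1)) = true
      · have hs' : ∀ k, k ∈ PySem.Set.add s1 x.1 ↔ k ∈ PySem.Set.add s2 x.1 := by
          intro k; simp [PySem.Set.mem_add, hs k]
        obtain ⟨h2, h1⟩ := ih (PySem.Set.add s1 x.1) (PySem.Set.add s2 x.1) hb' hs'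
        rw [if_pos h, if_pos h]
        exact ⟨by simp [h2], fun k => h1 k⟩
      · obtain ⟨h2, h1⟩ := ih s1 s2 hb' hs
        rw [if_neg h, if_neg h]
        exact ⟨h2, h1⟩

lemma pickR_skip (best1 best2 : PySem.Dict String Int) (n : String) :
    ∀ (l : List (String × Int)) (s1 s2 : PySem.Set String),
      (∀ e ∈ l, e.1 = n → e.2 ≠ best1.getD e.1 0) →
      (∀ e ∈ l, e.1 ≠ n → best1.getD e.1 0 = best2.getD e.1 0) →
      (∀ k, k ≠ n → (k ∈ s1 ↔ k ∈ s2)) →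
      (pvPickR best1 s1 l).2 = (pvPickR best2 s2 l).2.filter (fun e => !(e.1 == n)) ∧
      (∀ k, k ≠ n → (k ∈ (pvPickR best1 s1 l).1 ↔ k ∈ (pvPickR best2 s2 l).1)) ∧
      (n ∈ (pvPickR best1 s1 l).1 ↔ n ∈ s1) := by
  intro l
  induction l with
  | nil => intro s1 s2 _ _ hs; exact ⟨rfl, hs, Iff.rfl⟩
  | cons x t ih =>
      intro s1 s2 h1 h2 hs
      have h1' : ∀ e ∈ t, e.1 = n → e.2 ≠ best1.getD e.1 0 := fun e he => h1 e (by simp [he])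
      have h2' : ∀ e ∈ t, e.1 ≠ n → best1.getD e.1 0 = best2.getD e.1 0 := fun e he => h2 e (by simp [he])
      by_cases hxn : x.1 = n
      · have hc1 : (decide (x.2 = best1.getD x.1 0) && !(PySem.Set.contains s1 x.1)) = false := by
          have := h1 x (by simp) hxn
          simp [this]
        by_cases hc2 : (decide (x.2 = best2.getD x.1 0) && !(PySem.Set.contains s2 x.1)) = true
        · have hs' : ∀ k, k ≠ n → (k ∈ s1 ↔ k ∈ s2.add x.1) := by
            intro k hk
            rw [PySem.Set.mem_add]
            constructor
            · intro h; exact Or.inl ((hs k hk).mp h)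
            · rintro (h | h)
              · exact (hs k hk).mpr h
              · exact absurd (h.trans hxn) hk
          obtain ⟨g1, g2, g3⟩ := ih s1 (s2.add x.1) h1' h2' hs'
          simp only [pvPickR, hc1, Bool.false_eq_true, if_false, if_pos hc2]
          refine ⟨?_, g2, g3⟩
          have hx : (!(x.1 == n)) = false := by simp [hxn]
          simp [hx, g1]
        · obtain ⟨g1, g2, g3⟩ := ih s1 s2 h1' h2' hs
          simp only [pvPickR, hc1, Bool.false_eq_true, if_false, if_neg hc2]
          exact ⟨g1, g2, g3⟩
      · have hbx : best1.getD x.1 0 = best2.getD x.1 0 := h2 x (by simp) hxn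
        have hcx : PySem.Set.contains s1 x.1 = PySem.Set.contains s2 x.1 := by
          by_cases hm : x.1 ∈ s1
          · have hm2 : x.1 ∈ s2 := (hs x.1 hxn).mp hm
            simp [pysem, hm, hm2]
          · have hm2 : x.1 ∉ s2 := fun h => hm ((hs x.1 hxn).mpr h)
            simp [pysem, hm, hm2]
        by_cases hc : (decide (x.2 = best2.getD x.1 0) && !(PySem.Set.contains s2 x.1)) = true
        · have hc1 : (decide (x.2 = best1.getD x.1 0) && !(PySem.Set.contains s1 x.1)) = true := by
            rw [hbx, hcx]; exact hc
          have hs' : ∀ k, k ≠ n → (k ∈ s1.add x.1 ↔ k ∈ s2.add x.1) := by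
            intro k hk
            rw [PySem.Set.mem_add, PySem.Set.mem_add, hs k hk]
          obtain ⟨g1, g2, g3⟩ := ih (s1.add x.1) (s2.add x.1) h1' h2' hs'
          simp only [pvPickR, if_pos hc1, if_pos hc]
          have hx : (!(x.1 == n)) = true := by simp [hxn]
          refine ⟨by simp [hx, g1], g2, ?_⟩
          rw [g3, PySem.Set.mem_add]
          constructor
          · rintro (h | h)
            · exact h
            · exact absurd h.symm hxn
          · exact Or.inl
        · have hc1 : (decide (x.2 = best1.getD x.1 0) && !(PySem.Set.contains s1 x.1)) ≠ true := by
            rw [hbx, hcx]; exact hc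
          obtain ⟨g1, g2, g3⟩ := ih s1 s2 h1' h2' hs
          simp only [pvPickR, if_neg hc1, if_neg hc]
          exact ⟨g1, g2, g3⟩

lemma pickR_out_mem (best : PySem.Dict String Int) :
    ∀ (l : List (String × Int)) (s : PySem.Set String),
      ∀ e ∈ (pvPickR best s l).2, e ∈ l ∧ e.2 = best.getD e.1 0 ∧ e.1 ∉ s := by
  intro l
  induction l with
  | nil => intro s e he; simp [pvPickR] at he
  | cons x t ih =>
      intro s e he
      by_cases hc : (decide (x.2 = best.getD x.1 0) && !(PySem.Set.contains s x.1)) = true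
      · simp only [pvPickR, if_pos hc] at he
        rcases List.mem_cons.mp he with rfl | he'
        · refine ⟨by simp, by simpa using (Bool.and_eq_true_iff.mp hc).1, ?_⟩
          have := (Bool.and_eq_true_iff.mp hc).2
          simpa [pysem] using this
        · obtain ⟨m1, m2, m3⟩ := ih (s.add x.1) e he'
          exact ⟨by simp [m1], m2, fun hm => m3 (by rw [PySem.Set.mem_add]; exact Or.inl hm)⟩
      · simp only [pvPickR, if_neg hc] at he
        obtain ⟨m1, m2, m3⟩ := ih s e he
        exact ⟨by simp [m1], m2, m3⟩

lemma pickR_out_nodup (best : PySem.Dict String Int) :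
    ∀ (l : List (String × Int)) (s : PySem.Set String),
      ((pvPickR best s l).2.map Prod.fst).Nodup := by
  intro l
  induction l with
  | nil => intro s; simp [pvPickR]
  | cons x t ih =>
      intro s
      by_cases hc : (decide (x.2 = best.getD x.1 0) && !(PySem.Set.contains s x.1)) = true
      · simp only [pvPickR, if_pos hc, List.map_cons, List.nodup_cons]
        refine ⟨?_, ih (s.add x.1)⟩
        intro hmem
        obtain ⟨e, he, hfst⟩ := List.mem_map.mp hmem
        have := (pickR_out_mem best t (s.add x.1) e he).2.2
        exact this (by rw [PySem.Set.mem_add]; exact Or.inr hfst)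
      · simp only [pvPickR, if_neg hc]
        exact ih s

lemma pickR_seen (best : PySem.Dict String Int) :
    ∀ (l : List (String × Int)) (s : PySem.Set String) (k : String),
      k ∈ (pvPickR best s l).1 ↔ k ∈ s ∨ k ∈ (pvPickR best s l).2.map Prod.fst := by
  intro l
  induction l with
  | nil => intro s k; simp [pvPickR]
  | cons x t ih =>
      intro s k
      by_cases hc : (decide (x.2 = best.getD x.1 0) && !(PySem.Set.contains s x.1)) = true
      · simp only [pvPickR, if_pos hc, List.map_cons, List.mem_cons]
        rw [ih (s.add x.1) k, PySem.Set.mem_add]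
        tauto
      · simp only [pvPickR, if_neg hc]
        exact ih s k

-- pickR over an appended element is one pvPickStep on the result for the prefix
lemma pickR_append_singleton (best : PySem.Dict String Int) (s : PySem.Set String)
    (p : List (String × Int)) (x : String × Int) :
    pvPickR best s (p ++ [x]) = pvPickStep best (pvPickR best s p) x := by
  have h1 := pick_foldl_eq_pickR best (p ++ [x]) s []
  rw [List.foldl_append, pick_foldl_eq_pickR best p s []] at h1
  simp only [List.foldl_cons, List.foldl_nil, List.nil_append] at h1
  simpa using h1.symm

-- characterisation of pass 1: get? is none iff the key is absent, some v → v is the attained minimum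
lemma bestOf_none :
    ∀ (l : List (String × Int)) (k : String),
      (l.foldl pvBestStep PySem.Dict.empty).get? k = none ↔ ∀ e ∈ l, e.1 ≠ k := by
  intro l
  induction l using List.reverseRecOn with
  | nil => intro k; simp [PySem.Dict.get?_empty]
  | append_singleton l x ih =>
      intro k
      rw [List.foldl_append]
      simp only [List.foldl_cons, List.foldl_nil]
      by_cases hc : (!((l.foldl pvBestStep PySem.Dict.empty).contains x.1) || decide (x.2 < (l.foldl pvBestStep PySem.Dict.empty).getD x.1 0)) = true
      · rw [pvBestStep, if_pos hc]
        by_cases hk : k = x.1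
        · subst hk
          rw [PySem.Dict.get?_insert_self]
          simp only [reduceCtorEq, false_iff]
          intro hall
          exact hall x (List.mem_append.mpr (Or.inr (by simp))) rfl
        · rw [PySem.Dict.get?_insert, if_neg hk, ih k]
          constructor
          · rintro h a hab
            rcases List.mem_append.mp hab with hab | hab
            · exact h a hab
            · have : a = x := by simpa using hab
              subst this
              exact Ne.symm hk
          · intro h a hab
            exact h a (List.mem_append.mpr (Or.inl hab))
      · rw [pvBestStep, if_neg hc]
        have hcont : (l.foldl pvBestStep PySem.Dict.empty).contains x.1 = true := by
          revert hc; cases h : (l.foldl pvBestStep PySem.Dict.empty).contains x.1 <;> simp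
        have hsome : (l.foldl pvBestStep PySem.Dict.empty).get? x.1 ≠ none := by
          rw [PySem.Dict.contains_eq_isSome_get?] at hcont
          exact fun h => by simp [h] at hcont
        by_cases hk : k = x.1
        · subst hk
          constructor
          · intro h; exact absurd h hsome
          · intro hall
            exact absurd rfl (hall x (List.mem_append.mpr (Or.inr (by simp))))
        · rw [ih k]
          constructor
          · rintro h a hab
            rcases List.mem_append.mp hab with hab | hab
            · exact h a hab
            · have : a = x := by simpa using hab
              subst this
              exact Ne.symm hk
          · intro h a hab
            exact h a (List.mem_append.mpr (Or.inl hab))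

lemma bestOf_some :
    ∀ (l : List (String × Int)) (k : String) (v : Int),
      (l.foldl pvBestStep PySem.Dict.empty).get? k = some v →
      (∃ e ∈ l, e.1 = k ∧ e.2 = v) ∧ ∀ e ∈ l, e.1 = k → v ≤ e.2 := by
  intro l
  induction l using List.reverseRecOn with
  | nil => intro k v h; simp [PySem.Dict.get?_empty] at h
  | append_singleton l x ih =>
      intro k v h
      rw [List.foldl_append] at h
      simp only [List.foldl_cons, List.foldl_nil] at h
      by_cases hc : (!((l.foldl pvBestStep PySem.Dict.empty).contains x.1) || decide (x.2 < (l.foldl pvBestStep PySem.Dict.empty).getD x.1 0)) = true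
      · rw [pvBestStep, if_pos hc] at h
        by_cases hk : k = x.1
        · subst hk
          rw [PySem.Dict.get?_insert_self] at h
          have hv : v = x.2 := by injection h; omega
          subst hv
          refine ⟨⟨x, by simp⟩, ?_⟩
          intro e he hek
          rcases List.mem_append.mp he with he' | he'
          · -- e comes from l: the condition held, so either the key was absent or x.2 beats the old minimum
            rcases Bool.or_eq_true_iff.mp hc with hc' | hc'
            · have hnone : (l.foldl pvBestStep PySem.Dict.empty).get? x.1 = none := by
                rw [PySem.Dict.contains_eq_isSome_get?] at hc'
                cases hg : (l.foldl pvBestStep PySem.Dict.empty).get? x.1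
                · rfl
                · rw [hg] at hc'; simp at hc'
              exact absurd hek ((bestOf_none l x.1).mp hnone e he')
            · have hlt : x.2 < (l.foldl pvBestStep PySem.Dict.empty).getD x.1 0 := of_decide_eq_true hc'
              cases hg : (l.foldl pvBestStep PySem.Dict.empty).get? x.1 with
              | none => exact absurd hek ((bestOf_none l x.1).mp hg e he')
              | some v' =>
                  have hgd : (l.foldl pvBestStep PySem.Dict.empty).getD x.1 0 = v' := by
                    simp [PySem.Dict.getD_eq_get?_getD, hg]
                  have := (ih x.1 v' hg).2 e he' hek
                  omega
          · have : e = x := by simpa using he'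
            subst this; omega
        · rw [PySem.Dict.get?_insert, if_neg hk] at h
          obtain ⟨⟨e0, he0, he0k, he0v⟩, hmin⟩ := ih k v h
          refine ⟨⟨e0, by simp [he0], he0k, he0v⟩, ?_⟩
          intro e he hek
          rcases List.mem_append.mp he with he' | he'
          · exact hmin e he' hek
          · have : e = x := by simpa using he'
            subst this; exact absurd hek (Ne.symm hk)
      · rw [pvBestStep, if_neg hc] at h
        have hcont : (l.foldl pvBestStep PySem.Dict.empty).contains x.1 = true := by
          revert hc; cases hcc : (l.foldl pvBestStep PySem.Dict.empty).contains x.1 <;> simp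
        have hnlt : ¬ x.2 < (l.foldl pvBestStep PySem.Dict.empty).getD x.1 0 := by
          intro hlt
          exact hc (by simp [hlt])
        obtain ⟨⟨e0, he0, he0k, he0v⟩, hmin⟩ := ih k v h
        refine ⟨⟨e0, by simp [he0], he0k, he0v⟩, ?_⟩
        intro e he hek
        rcases List.mem_append.mp he with he' | he'
        · exact hmin e he' hek
        · have : e = x := by simpa using he'
          subst this
          have hgd : (l.foldl pvBestStep PySem.Dict.empty).getD e.1 0 = v := by
            rw [hek]
            simp [PySem.Dict.getD_eq_get?_getD, h]
          omega

-- the main invariant, by induction over the list from the right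
lemma main_invariant :
    ∀ (l : List (String × Int)),
      l.foldl pvAStep [] = (pvPickR (l.foldl pvBestStep PySem.Dict.empty) [] l).2 ∧
      (∀ k, k ∈ (pvPickR (l.foldl pvBestStep PySem.Dict.empty) [] l).1 ↔ ∃ e ∈ l, e.1 = k) := by
  intro l
  induction l using List.reverseRecOn with
  | nil => exact ⟨rfl, by intro k; simp [pvPickR]⟩
  | append_singleton p x ih =>
      obtain ⟨ih1, ih2⟩ := ih
      have hA : (p ++ [x]).foldl pvAStep [] = pvAStep (p.foldl pvAStep []) x := by
        rw [List.foldl_append]; rfl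
      have hbest : (p ++ [x]).foldl pvBestStep PySem.Dict.empty
          = pvBestStep (p.foldl pvBestStep PySem.Dict.empty) x := by
        rw [List.foldl_append]; rfl
      have hpickapp := pickR_append_singleton ((p ++ [x]).foldl pvBestStep PySem.Dict.empty)
        [] p x
      cases hget : (p.foldl pvBestStep PySem.Dict.empty).get? x.1 with
      | none =>
          -- fresh key: both sides append x
          have hcont : (p.foldl pvBestStep PySem.Dict.empty).contains x.1 = false := by
            rw [PySem.Dict.contains_eq_isSome_get?, hget]; rfl
          have hd' : (p ++ [x]).foldl pvBestStep PySem.Dict.empty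
              = (p.foldl pvBestStep PySem.Dict.empty).insert x.1 x.2 := by
            rw [hbest, pvBestStep, if_pos (by simp [hcont])]
          have hkeys : ∀ e ∈ p, e.1 ≠ x.1 := (bestOf_none p x.1).mp hget
          have hbagree : ∀ e ∈ p,
              ((p ++ [x]).foldl pvBestStep PySem.Dict.empty).getD e.1 0
                = (p.foldl pvBestStep PySem.Dict.empty).getD e.1 0 := by
            intro e he
            rw [hd', PySem.Dict.getD_insert, if_neg (hkeys e he)]
          obtain ⟨c1, c2⟩ := pickR_congr _ _ p [] [] hbagree (fun _ => Iff.rfl)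
          have hnotmem : x.1 ∉ (pvPickR ((p ++ [x]).foldl pvBestStep PySem.Dict.empty) [] p).1 := by
            intro hm
            obtain ⟨e, he, hek⟩ := (ih2 x.1).mp ((c2 x.1).mp hm)
            exact hkeys e he hek
          have hcondB : (decide (x.2 = ((p ++ [x]).foldl pvBestStep PySem.Dict.empty).getD x.1 0)
              && !(PySem.Set.contains (pvPickR ((p ++ [x]).foldl pvBestStep PySem.Dict.empty) [] p).1 x.1)) = true := by
            rw [hd'] at hnotmem ⊢
            rw [PySem.Dict.getD_insert_self]
            simp [pysem, hnotmem]
          have hB : (pvPickR ((p ++ [x]).foldl pvBestStep PySem.Dict.empty) [] (p ++ [x])).2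
              = (pvPickR (p.foldl pvBestStep PySem.Dict.empty) [] p).2 ++ [x] := by
            rw [hpickapp, pvPickStep, if_pos hcondB]
            simpa using c1
          have hAfind : (p.foldl pvAStep []).find? (fun j => j.1 == x.1) = none := by
            apply List.find?_eq_none.mpr
            intro j hj
            have hj' : j ∈ (pvPickR (p.foldl pvBestStep PySem.Dict.empty) [] p).2 := ih1 ▸ hj
            have := (pickR_out_mem _ p [] j hj').1
            simp [hkeys j this]
          have hAv : (p ++ [x]).foldl pvAStep [] = p.foldl pvAStep [] ++ [x] := by
            rw [hA, pvAStep, pvAInner_eq, hAfind]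
          refine ⟨by rw [hAv, hB, ih1], ?_⟩
          intro k
          rw [hpickapp, pvPickStep, if_pos hcondB]
          simp only [PySem.Set.mem_add]
          rw [c2 k, ih2 k]
          constructor
          · rintro (⟨e, he, hek⟩ | rfl)
            · exact ⟨e, by simp [he], hek⟩
            · exact ⟨x, by simp, rfl⟩
          · rintro ⟨e, he, hek⟩
            rcases List.mem_append.mp he with he' | he'
            · exact Or.inl ⟨e, he', hek⟩
            · have : e = x := by simpa using he'
              subst this
              exact Or.inr hek.symm
      | some v =>
          have hcont : (p.foldl pvBestStep PySem.Dict.empty).contains x.1 = true := by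
            rw [PySem.Dict.contains_eq_isSome_get?, hget]; rfl
          have hgd : (p.foldl pvBestStep PySem.Dict.empty).getD x.1 0 = v := by
            simp [PySem.Dict.getD_eq_get?_getD, hget]
          obtain ⟨⟨e0, he0, he0k, he0v⟩, hmin⟩ := bestOf_some p x.1 v hget
          -- A's inner scan finds the unique kept entry with key x.1, and its price is v
          have hxmem : x.1 ∈ (pvPickR (p.foldl pvBestStep PySem.Dict.empty) [] p).1 :=
            (ih2 x.1).mpr ⟨e0, he0, he0k⟩
          have hxout : x.1 ∈ (pvPickR (p.foldl pvBestStep PySem.Dict.empty) [] p).2.map Prod.fst := by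
            have := (pickR_seen _ p [] x.1).mp hxmem
            simpa using this
          obtain ⟨j0, hj0, hj0k⟩ := List.mem_map.mp hxout
          have hfindsome : ((p.foldl pvAStep []).find? (fun j => j.1 == x.1)).isSome := by
            rw [ih1]
            exact List.find?_isSome.mpr ⟨j0, hj0, by simp [hj0k]⟩
          obtain ⟨j, hfind⟩ := Option.isSome_iff_exists.mp hfindsome
          have hjmem : j ∈ p.foldl pvAStep [] := List.mem_of_find?_eq_some hfind
          have hjk : j.1 = x.1 := by simpa using List.find?_some hfind
          have hjv : j.2 = v := by
            have hj' : j ∈ (pvPickR (p.foldl pvBestStep PySem.Dict.empty) [] p).2 := ih1 ▸ hjmem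
            have := (pickR_out_mem _ p [] j hj').2.1
            rw [this, hjk, hgd]
          by_cases hlt : x.2 < v
          · -- strictly cheaper: A removes the old entry and appends; B's pass 2 drops it
            have hd' : (p ++ [x]).foldl pvBestStep PySem.Dict.empty
                = (p.foldl pvBestStep PySem.Dict.empty).insert x.1 x.2 := by
              rw [hbest, pvBestStep, if_pos (by simp [hgd, hlt])]
            have hsk1 : ∀ e ∈ p, e.1 = x.1 →
                e.2 ≠ ((p ++ [x]).foldl pvBestStep PySem.Dict.empty).getD e.1 0 := by
              intro e he hek
              rw [hek, hd', PySem.Dict.getD_insert_self]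
              have := hmin e he hek
              omega
            have hsk2 : ∀ e ∈ p, e.1 ≠ x.1 →
                ((p ++ [x]).foldl pvBestStep PySem.Dict.empty).getD e.1 0
                  = (p.foldl pvBestStep PySem.Dict.empty).getD e.1 0 := by
              intro e he hek
              rw [hd', PySem.Dict.getD_insert, if_neg hek]
            obtain ⟨g1, g2, g3⟩ := pickR_skip _ _ x.1 p [] [] hsk1 hsk2 (fun _ _ => Iff.rfl)
            have hnotmem : x.1 ∉ (pvPickR ((p ++ [x]).foldl pvBestStep PySem.Dict.empty) [] p).1 := by
              intro hm
              simpa using g3.mp hm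
            have hcondB : (decide (x.2 = ((p ++ [x]).foldl pvBestStep PySem.Dict.empty).getD x.1 0)
                && !(PySem.Set.contains (pvPickR ((p ++ [x]).foldl pvBestStep PySem.Dict.empty) [] p).1 x.1)) = true := by
              rw [hd'] at hnotmem ⊢
              rw [PySem.Dict.getD_insert_self]
              simp [pysem, hnotmem]
            have hB : (pvPickR ((p ++ [x]).foldl pvBestStep PySem.Dict.empty) [] (p ++ [x])).2
                = (pvPickR (p.foldl pvBestStep PySem.Dict.empty) [] p).2.filter (fun e => !(e.1 == x.1)) ++ [x] := by
              rw [hpickapp, pvPickStep, if_pos hcondB]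
              simpa using g1
            have hrem : PySem.List.remove? (p.foldl pvAStep []) j = some ((p.foldl pvAStep []).erase j) :=
              PySem.List.remove?_eq_some_erase _ _ hjmem
            have hnd : ((p.foldl pvAStep []).map Prod.fst).Nodup := by
              rw [ih1]; exact pickR_out_nodup _ p []
            have herase : (p.foldl pvAStep []).erase j
                = (p.foldl pvAStep []).filter (fun q => !(q.1 == x.1)) :=
              erase_eq_filter_of_nodup x.1 j _ hnd hfind
            have hAv : (p ++ [x]).foldl pvAStep []
                = (p.foldl pvAStep []).filter (fun q => !(q.1 == x.1)) ++ [x] := by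
              rw [hA, pvAStep, pvAInner_eq, hfind]
              simp [hjv, hlt, hrem, herase]
            refine ⟨by rw [hAv, hB, ih1], ?_⟩
            intro k
            rw [hpickapp, pvPickStep, if_pos hcondB]
            simp only [PySem.Set.mem_add]
            constructor
            · rintro (hm | rfl)
              · by_cases hk : k = x.1
                · exact ⟨x, by simp, hk.symm⟩
                · obtain ⟨e, he, hek⟩ := (ih2 k).mp ((g2 k hk).mp hm)
                  exact ⟨e, by simp [he], hek⟩
              · exact ⟨x, by simp, rfl⟩
            · rintro ⟨e, he, hek⟩
              by_cases hk : k = x.1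
              · exact Or.inr hk
              · rcases List.mem_append.mp he with he' | he'
                · exact Or.inl ((g2 k hk).mpr ((ih2 k).mpr ⟨e, he', hek⟩))
                · have : e = x := by simpa using he'
                  subst this
                  exact absurd (hek ▸ rfl) (hek ▸ hk)
          · -- not cheaper: both sides leave everything unchanged
            have hd' : (p ++ [x]).foldl pvBestStep PySem.Dict.empty
                = p.foldl pvBestStep PySem.Dict.empty := by
              rw [hbest, pvBestStep, if_neg (by simp [hgd, hcont, hlt])]
            have hcondB : (decide (x.2 = ((p ++ [x]).foldl pvBestStep PySem.Dict.empty).getD x.1 0)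
                && !(PySem.Set.contains (pvPickR ((p ++ [x]).foldl pvBestStep PySem.Dict.empty) [] p).1 x.1)) ≠ true := by
              rw [hd']
              simp [pysem, hxmem]
            have hB : (pvPickR ((p ++ [x]).foldl pvBestStep PySem.Dict.empty) [] (p ++ [x]))
                = pvPickR (p.foldl pvBestStep PySem.Dict.empty) [] p := by
              rw [hpickapp, pvPickStep, if_neg hcondB, hd']
            have hAv : (p ++ [x]).foldl pvAStep [] = p.foldl pvAStep [] := by
              rw [hA, pvAStep, pvAInner_eq, hfind]
              simp [hjv, hlt]
            refine ⟨by rw [hAv, hB, ih1], ?_⟩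
            intro k
            rw [hB, ih2 k]
            constructor
            · rintro ⟨e, he, hek⟩
              exact ⟨e, by simp [he], hek⟩
            · rintro ⟨e, he, hek⟩
              rcases List.mem_append.mp he with he' | he'
              · exact ⟨e, he', hek⟩
              · have : e = x := by simpa using he'
                subst this
                exact ⟨e0, he0, he0k.trans hek⟩

-- ===== VERDICT (by name: the statement is the Claim_ definition above) =====
theorem get_all_hotels_spec : Claim_equal_get_all_hotels := by
  intro ha hb _
  unfold Spec_get_all_hotels get_all_hotels get_all_hotels_alt
  change List.foldl pvAStep [] (ha ++ hb) =
    (List.foldl (pvPickStep (List.foldl pvBestStep PySem.Dict.empty (ha ++ hb)))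
      (PySem.Set.empty, []) (ha ++ hb)).2
  rw [pick_foldl_eq_pickR]
  simpa using (main_invariant (ha ++ hb)).1
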